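-- pv_equiv track=rewrite | github.com/ehhop/epic-report-parser | ehhop.py | return_top_problems_per_month
-- ===== SOURCE A (Python) =====
-- def return_top_problems_per_month(lst):
-- 	if len(lst) == 0:
-- 		return {}
-- 	newlst = [x.lower() for x in lst]
-- 	uniquelist = list(set(newlst))
-- 	top_dict = dict.fromkeys(uniquelist,0)
-- 	for x in uniquelist:
-- 		counts = newlst.count(x)
-- 		if counts > 1:
-- 			top_dict[x] = counts
-- 	return top_dict
-- ===== SOURCE B (Python) =====
-- def return_top_problems_per_month(lst):
--     counts = {}
--     for x in lst:
--         k = x.lower()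
--         counts[k] = counts.get(k, 0) + 1
--     return {k: (c if c > 1 else 0) for k, c in counts.items()}
-- ===== Notes on version B (the rewrite author's own statement) =====
-- stated objective: faster
-- what changed: B makes one counting pass with a dict (lowercasing on the fly) and then maps counts to count-or-0, instead of A's building newlst, deduplicating via set and calling newlst.count once per unique element.
import Mathlib
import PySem

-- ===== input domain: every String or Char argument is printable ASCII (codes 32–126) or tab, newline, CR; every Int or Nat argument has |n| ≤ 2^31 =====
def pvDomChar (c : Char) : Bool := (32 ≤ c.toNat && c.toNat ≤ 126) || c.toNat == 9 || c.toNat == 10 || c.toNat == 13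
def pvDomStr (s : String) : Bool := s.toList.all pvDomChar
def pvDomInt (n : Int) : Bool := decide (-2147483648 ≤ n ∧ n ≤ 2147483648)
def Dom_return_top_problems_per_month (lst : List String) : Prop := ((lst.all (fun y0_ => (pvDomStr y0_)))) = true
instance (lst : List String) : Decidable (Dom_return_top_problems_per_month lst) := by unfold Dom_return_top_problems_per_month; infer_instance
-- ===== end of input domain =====

-- B replaces A's per-unique-key `newlst.count` inner scans by one counting pass with a dict
-- (objective: faster). Dict outputs are compared as dicts (order-insensitive): A iterates a
-- Python set (hash order); the port uses first-occurrence order, which the dict comparison ignores.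

-- ===== PORT A =====
def return_top_problems_per_month (lst : List String) : List (String × Int) :=
  if lst.length == 0 then []
  else
    let newlst := lst.map PySem.Str.lower
    let uniquelist := PySem.Set.ofList newlst                    -- list(set(newlst))
    -- dict.fromkeys(uniquelist, 0): uniquelist has no duplicates, so the dict is this literal
    let top_dict : PySem.Dict String Int := PySem.Dict.mk (uniquelist.map (fun k => (k, 0)))
    (uniquelist.foldl (fun d x =>
        let counts : Int := (PySem.List.count newlst x : Int)
        if counts > 1 then d.insert x counts else d) top_dict).items

-- ===== PORT B =====
def return_top_problems_per_month_alt (lst : List String) : List (String × Int) :=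
  let counts := lst.foldl
    (fun d x => let k := PySem.Str.lower x; d.insert k (d.getD k 0 + 1))
    (PySem.Dict.empty : PySem.Dict String Int)
  -- dict comprehension over counts.items: keys are already distinct, so its items are this map
  counts.items.map (fun p => (p.1, if p.2 > 1 then p.2 else 0))

-- ===== PRECONDITION & SPEC =====
def Spec_return_top_problems_per_month (lst : List String) (out : List (String × Int)) : Prop := out = return_top_problems_per_month_alt lst
instance (lst : List String) (out : List (String × Int)) : Decidable (Spec_return_top_problems_per_month lst out) := by unfold Spec_return_top_problems_per_month; infer_instance

-- ===== CLAIM (what is proved, stated in full; the proofs are below) =====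
def Claim_equal_return_top_problems_per_month : Prop := ∀ (lst : List String), Dom_return_top_problems_per_month lst → Spec_return_top_problems_per_month lst (return_top_problems_per_month lst)

-- ===== LEMMAS AND PROOFS =====

-- A's update loop, abstracted: conditional insert of a value f x that does not depend on d.
-- Keys not in u are untouched.
theorem pv_fold_getD_not_mem (f : String → Int)
    (u : List String) (d : PySem.Dict String Int) (k : String) (hk : k ∉ u) :
    (u.foldl (fun d x => if f x > 1 then d.insert x (f x) else d) d).getD k 0 = d.getD k 0 := by
  induction u generalizing d with
  | nil => rfl
  | cons a t ih =>
    simp only [List.mem_cons, not_or] at hk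
    simp only [List.foldl_cons]
    rw [ih _ hk.2]
    split
    · exact PySem.Dict.getD_insert_of_ne d _ _ hk.1
    · rfl

theorem pv_fold_getD_mem (f : String → Int)
    (u : List String) (d : PySem.Dict String Int) (k : String)
    (hnd : u.Nodup) (hk : k ∈ u) :
    (u.foldl (fun d x => if f x > 1 then d.insert x (f x) else d) d).getD k 0 =
      if f k > 1 then f k else d.getD k 0 := by
  induction u generalizing d with
  | nil => cases hk
  | cons a t ih =>
    simp only [List.nodup_cons] at hnd
    simp only [List.foldl_cons]
    rcases List.mem_cons.mp hk with rfl | hkt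
    · rw [pv_fold_getD_not_mem f t _ k hnd.1]
      split
      · exact PySem.Dict.getD_insert_self d k _ 0
      · rfl
    · have hne : k ≠ a := fun h => hnd.1 (h ▸ hkt)
      rw [ih _ hnd.2 hkt]
      by_cases hfa : f a > 1
      · simp only [hfa, if_true]
        rw [PySem.Dict.getD_insert_of_ne d _ _ hne]
      · simp only [hfa, if_false]

theorem pv_fold_keys (f : String → Int)
    (u : List String) (d : PySem.Dict String Int) (hc : ∀ x ∈ u, d.contains x = true) :
    (u.foldl (fun d x => if f x > 1 then d.insert x (f x) else d) d).keys = d.keys := by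
  induction u generalizing d with
  | nil => rfl
  | cons a t ih =>
    simp only [List.foldl_cons]
    have hca := hc a (List.mem_cons_self ..)
    have step_keys : (if f a > 1 then d.insert a (f a) else d).keys = d.keys := by
      split
      · exact PySem.Dict.keys_insert_of_contains d _ hca
      · rfl
    have step_contains : ∀ x ∈ t, (if f a > 1 then d.insert a (f a) else d).contains x = true := by
      intro x hx
      split
      · rw [PySem.Dict.contains_insert]
        simp [hc x (List.mem_cons_of_mem _ hx)]
      · exact hc x (List.mem_cons_of_mem _ hx)
    rw [ih _ step_contains, step_keys]

-- the common normal form of both ports on a nonempty list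
theorem pv_A_items (lst : List String) (h : lst ≠ []) :
    return_top_problems_per_month lst =
      (PySem.Set.ofList (lst.map PySem.Str.lower)).map
        (fun k => (k, if ((lst.map PySem.Str.lower).count k : Int) > 1
                      then ((lst.map PySem.Str.lower).count k : Int) else 0)) := by
  unfold return_top_problems_per_month
  have hlen : (lst.length == 0) = false := by
    simp [List.length_eq_zero_iff, h]
  rw [hlen]
  simp only [Bool.false_eq_true, if_false, PySem.List.count_eq]
  generalize hm : lst.map PySem.Str.lower = m
  generalize hu : PySem.Set.ofList m = u
  have hnd : u.Nodup := hu ▸ PySem.Set.nodup_ofList m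
  have hkeys0 : (PySem.Dict.mk (u.map (fun k => (k, (0 : Int))))).keys = u := by
    simp [PySem.Dict.keys, List.map_map, Function.comp_def]
  have hc0 : ∀ x ∈ u, (PySem.Dict.mk (u.map (fun k => (k, (0 : Int))))).contains x = true := by
    intro x hx
    exact (PySem.Dict.contains_iff_mem_keys _ x).mpr (by rw [hkeys0]; exact hx)
  have hget0 : ∀ k ∈ u, (PySem.Dict.mk (u.map (fun k => (k, (0 : Int))))).getD k 0 = 0 := by
    intro k hk
    have hmem : (k, (0 : Int)) ∈ (PySem.Dict.mk (u.map (fun k => (k, (0 : Int))))).items :=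
      List.mem_map.mpr ⟨k, hk, rfl⟩
    exact PySem.Dict.getD_of_mem_items _ hmem (by rw [hkeys0]; exact hnd) 0
  have hkeysF := (pv_fold_keys (fun x => (m.count x : Int)) u
      (PySem.Dict.mk (u.map (fun k => (k, (0 : Int))))) hc0).trans hkeys0
  rw [PySem.Dict.items_eq_map_keys _ (by rw [hkeysF]; exact hnd) 0, hkeysF]
  refine List.map_congr_left ?_
  intro k hk
  rw [pv_fold_getD_mem (fun x => (m.count x : Int)) u _ k hnd hk, hget0 k hk]

theorem pv_B_items (lst : List String) :
    return_top_problems_per_month_alt lst =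
      (PySem.Set.ofList (lst.map PySem.Str.lower)).map
        (fun k => (k, if ((lst.map PySem.Str.lower).count k : Int) > 1
                      then ((lst.map PySem.Str.lower).count k : Int) else 0)) := by
  unfold return_top_problems_per_month_alt
  have h1 : lst.foldl
      (fun d x => let k := PySem.Str.lower x; d.insert k (d.getD k 0 + 1))
      (PySem.Dict.empty : PySem.Dict String Int)
      = PySem.Dict.counter (lst.map PySem.Str.lower) := by
    rw [← PySem.Dict.foldl_insert_getD_add_one_eq_counter, List.foldl_map]
  simp only [h1, PySem.Dict.items_counter, List.map_map, Function.comp_def]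

-- ===== VERDICT (by name: the statement is the Claim_ definition above) =====
theorem return_top_problems_per_month_spec : Claim_equal_return_top_problems_per_month := by
  intro lst _
  unfold Spec_return_top_problems_per_month
  by_cases h : lst = []
  · subst h; rfl
  · rw [pv_A_items lst h, pv_B_items lst]
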